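-- pv_equiv track=rewrite | github.com/alexandersinkovic/AdventofCode | 2023/Day18.py | calcLava
-- ===== SOURCE A (Python) =====
-- def calcLava(pit):
--     res = 0
--     for line in pit:
--         counting = False
--         for i in range(len(line)):
--             if line[i] == '#':
--                 counting = not counting
--                 res += 1
--             elif counting:
--                 res += 1
--     return res
-- ===== SOURCE B (Python) =====
-- def calcLava(pit):
--     total = 0
--     for line in pit:
--         ps = [i for i, c in enumerate(line) if c == '#']
--         while len(ps) >= 2:
--             total += ps[1] - ps[0] + 1
--             ps = ps[2:]
--         if ps:
--             total += len(line) - ps[0]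
--     return total
-- ===== Notes on version B (the rewrite author's own statement) =====
-- stated objective: alternative
-- what changed: B collects the indices of '#' in each line and sums the (inclusive) spans between consecutive index pairs arithmetically, plus a trailing fill for an odd last '#', instead of A's cell-by-cell toggle-flag scanline fill.
import Mathlib
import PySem

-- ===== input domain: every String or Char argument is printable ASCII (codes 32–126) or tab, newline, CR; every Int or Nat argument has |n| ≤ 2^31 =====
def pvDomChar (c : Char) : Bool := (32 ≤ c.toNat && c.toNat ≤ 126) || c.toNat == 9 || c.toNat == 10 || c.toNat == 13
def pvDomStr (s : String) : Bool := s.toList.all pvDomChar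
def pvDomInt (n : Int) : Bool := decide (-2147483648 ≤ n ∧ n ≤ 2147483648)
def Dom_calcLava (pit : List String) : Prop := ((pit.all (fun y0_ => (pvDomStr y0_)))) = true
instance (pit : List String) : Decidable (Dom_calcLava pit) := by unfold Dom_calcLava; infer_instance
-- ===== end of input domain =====

-- B sums '#'-position pairs arithmetically instead of A's per-cell toggle fill; objective: alternative (same cost).

-- ===== PORT A =====
-- inner loop: for i in range(len(line)), state (counting, res)
def calcLava (pit : List String) : Int :=
  pit.foldl (fun res line =>
    ((PySem.List.pyRange 0 (line.toList.length : Int) 1).foldl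
      (fun (st : Bool × Int) i =>
        if PySem.List.pyGetD line.toList i ' ' = '#' then (!st.1, st.2 + 1)
        else if st.1 then (st.1, st.2 + 1) else st)
      (false, res)).2) 0

-- ===== PORT B =====
-- while len(ps) >= 2: consume one pair; then the odd trailing '#' if any
def pvLineAdd (len : Int) : List Int → Int → Int
  | a :: b :: rest, total => pvLineAdd len rest (total + (b - a + 1))
  | [x], total => total + (len - x)
  | [], total => total

def calcLava_alt (pit : List String) : Int :=
  pit.foldl (fun total line =>
    let cs := line.toList
    let ps := (PySem.List.enumerate cs 0).filterMap
      (fun p => if p.2 = '#' then some p.1 else none)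
    pvLineAdd (cs.length : Int) ps total) 0

-- ===== PRECONDITION & SPEC =====
def Spec_calcLava (pit : List String) (out : Int) : Prop := out = calcLava_alt pit
instance (pit : List String) (out : Int) : Decidable (Spec_calcLava pit out) := by unfold Spec_calcLava; infer_instance

-- ===== CLAIM (what is proved, stated in full; the proofs are below) =====
def Claim_equal_calcLava : Prop := ∀ (pit : List String), Dom_calcLava pit → Spec_calcLava pit (calcLava pit)

-- ===== LEMMAS AND PROOFS =====

-- A's inner-loop step, over chars
def pvStep (st : Bool × Int) (c : Char) : Bool × Int :=
  if c = '#' then (!st.1, st.2 + 1)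
  else if st.1 then (st.1, st.2 + 1) else st

-- '#' positions of cs starting at offset s
def pvPs (cs : List Char) (s : Int) : List Int :=
  (PySem.List.enumerate cs s).filterMap (fun p => if p.2 = '#' then some p.1 else none)

lemma pvPs_nil (s : Int) : pvPs [] s = [] := rfl

lemma pvPs_cons (c : Char) (cs : List Char) (s : Int) :
    pvPs (c :: cs) s = if c = '#' then s :: pvPs cs (s + 1) else pvPs cs (s + 1) := by
  simp [pvPs, PySem.List.enumerate_cons, List.filterMap_cons]
  split_ifs <;> rfl

lemma pvLineAdd_acc (len : Int) : ∀ (ps : List Int) (t : Int), pvLineAdd len ps t = t + pvLineAdd len ps 0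
  | [], t => by simp [pvLineAdd]
  | [x], t => by simp [pvLineAdd]
  | a :: b :: rest, t => by
      simp only [pvLineAdd]
      rw [pvLineAdd_acc len rest (t + (b - a + 1)), pvLineAdd_acc len rest (0 + (b - a + 1))]
      ring

-- continuation value when counting = true: fill to next '#' (inclusive) or to end of line
def pvTrue (len s : Int) (ps : List Int) : Int :=
  match ps with
  | [] => len - s
  | p0 :: rest => (p0 - s + 1) + pvLineAdd len rest 0

lemma pvInv (cs : List Char) (s r : Int) :
    (cs.foldl pvStep (false, r)).2 = r + pvLineAdd (s + cs.length) (pvPs cs s) 0 ∧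
    (cs.foldl pvStep (true, r)).2 = r + pvTrue (s + cs.length) s (pvPs cs s) := by
  induction cs generalizing s r with
  | nil => simp [pvPs_nil, pvLineAdd, pvTrue]
  | cons c cs ih =>
    have hlen : s + ((c :: cs).length : Int) = (s + 1) + cs.length := by
      simp; ring
    rw [hlen]
    constructor
    · by_cases hc : c = '#'
      · rw [List.foldl_cons, show pvStep (false, r) c = ((true : Bool), r + 1) from by
            simp [pvStep, hc]]
        rw [pvPs_cons, if_pos hc, (ih (s + 1) (r + 1)).2]
        cases hps : pvPs cs (s + 1) with
        | nil => simp [pvTrue, pvLineAdd]; ring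
        | cons p0 rest =>
          simp only [pvTrue, pvLineAdd]
          conv_rhs => rw [pvLineAdd_acc]
          ring
      · rw [List.foldl_cons, show pvStep (false, r) c = ((false : Bool), r) from by
            simp [pvStep, hc]]
        rw [pvPs_cons, if_neg hc]
        exact (ih (s + 1) r).1
    · by_cases hc : c = '#'
      · rw [List.foldl_cons, show pvStep (true, r) c = ((false : Bool), r + 1) from by
            simp [pvStep, hc]]
        rw [pvPs_cons, if_pos hc, (ih (s + 1) (r + 1)).1]
        simp only [pvTrue]
        ring
      · rw [List.foldl_cons, show pvStep (true, r) c = ((true : Bool), r + 1) from by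
            simp [pvStep, hc]]
        rw [pvPs_cons, if_neg hc, (ih (s + 1) (r + 1)).2]
        cases hps : pvPs cs (s + 1) with
        | nil => simp [pvTrue]; ring
        | cons p0 rest => simp only [pvTrue]; ring

lemma pvLine (cs : List Char) (r : Int) :
    (cs.foldl pvStep (false, r)).2 = pvLineAdd (cs.length : Int) (pvPs cs 0) r := by
  rw [pvLineAdd_acc]
  have := (pvInv cs 0 r).1
  simpa using this

lemma pvLineFold (line : String) (r : Int) :
    ((PySem.List.pyRange 0 (line.toList.length : Int) 1).foldl
      (fun (st : Bool × Int) i =>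
        if PySem.List.pyGetD line.toList i ' ' = '#' then (!st.1, st.2 + 1)
        else if st.1 then (st.1, st.2 + 1) else st)
      (false, r)).2
    = pvLineAdd (line.toList.length : Int) (pvPs line.toList 0) r := by
  have hf : (fun (st : Bool × Int) i =>
        if PySem.List.pyGetD line.toList i ' ' = '#' then (!st.1, st.2 + 1)
        else if st.1 then (st.1, st.2 + 1) else st)
      = (fun (acc : Bool × Int) j => pvStep acc (PySem.List.pyGetD line.toList j ' ')) := rfl
  rw [hf, PySem.List.foldl_pyRange_zero_pyGetD' line.toList ' ' pvStep ((false : Bool), r), pvLine]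

lemma pvMain (pit : List String) (r : Int) :
    pit.foldl (fun res line =>
      ((PySem.List.pyRange 0 (line.toList.length : Int) 1).foldl
        (fun (st : Bool × Int) i =>
          if PySem.List.pyGetD line.toList i ' ' = '#' then (!st.1, st.2 + 1)
          else if st.1 then (st.1, st.2 + 1) else st)
        (false, res)).2) r =
    pit.foldl (fun total line =>
      let cs := line.toList
      let ps := (PySem.List.enumerate cs 0).filterMap
        (fun p => if p.2 = '#' then some p.1 else none)
      pvLineAdd (cs.length : Int) ps total) r := by
  induction pit generalizing r with
  | nil => rfl
  | cons line rest ih =>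
    simp only [List.foldl_cons]
    rw [pvLineFold]
    exact ih _

-- ===== VERDICT (by name: the statement is the Claim_ definition above) =====
theorem calcLava_spec : Claim_equal_calcLava := by
  intro pit _
  unfold Spec_calcLava calcLava calcLava_alt
  exact pvMain pit 0
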